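-- pv_equiv track=rewrite | github.com/amosbangmo/ragcraft | src/infrastructure/adapters/rag/image_context_service.py | _format_neighbor_block
-- ===== SOURCE A (Python) =====
-- _MAX_CHARS_PER_NEIGHBOR = 380
--
-- _MAX_NEIGHBOR_BLOCK_CHARS = 900
--
-- def _format_neighbor_block(neighbors: list[dict]) -> str | None:
--     if not neighbors:
--         return None
--     lines: list[str] = []
--     used = 0
--     for i, n in enumerate(neighbors, start=1):
--         text = (n.get("raw_content") or n.get("summary") or "").strip()
--         text = " ".join(text.split())
--         if len(text) > _MAX_CHARS_PER_NEIGHBOR: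
--             text = text[: _MAX_CHARS_PER_NEIGHBOR - 1] + "…"
--         line = f"[{i}] {text}"
--         need = len(line) + (1 if lines else 0)
--         if used + need > _MAX_NEIGHBOR_BLOCK_CHARS:
--             break
--         lines.append(line)
--         used += need
--     return "\n".join(lines) if lines else None
-- ===== SOURCE B (Python) =====
-- _MAX_CHARS_PER_NEIGHBOR = 380
--
-- _MAX_NEIGHBOR_BLOCK_CHARS = 900
--
--
-- def _norm_text(n: dict) -> str:
--     text = " ".join(((n.get("raw_content") or n.get("summary") or "").strip()).split())
--     if len(text) > _MAX_CHARS_PER_NEIGHBOR: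
--         text = text[: _MAX_CHARS_PER_NEIGHBOR - 1] + "…"
--     return text
--
--
-- def _format_neighbor_block(neighbors: list[dict]) -> str | None:
--     # Pass 1: format every neighbor into its numbered line.
--     lines = [f"[{i}] {_norm_text(n)}" for i, n in enumerate(neighbors, start=1)]
--     # Pass 2: find the cut index k = length of the longest prefix within budget.
--     k, total = 0, 0
--     while k < len(lines):
--         total += len(lines[k]) + (1 if k else 0)
--         if total > _MAX_NEIGHBOR_BLOCK_CHARS:
--             break
--         k += 1
--     return "\n".join(lines[:k]) if k else None
-- ===== Notes on version B (the rewrite author's own statement) =====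
-- stated objective: alternative
-- what changed: A's single fused loop (append + running budget + break) is split into two passes: a comprehension that formats all numbered lines, then an index/prefix-sum scan that finds the cut index k, returning the join of lines[:k].
import Mathlib
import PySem

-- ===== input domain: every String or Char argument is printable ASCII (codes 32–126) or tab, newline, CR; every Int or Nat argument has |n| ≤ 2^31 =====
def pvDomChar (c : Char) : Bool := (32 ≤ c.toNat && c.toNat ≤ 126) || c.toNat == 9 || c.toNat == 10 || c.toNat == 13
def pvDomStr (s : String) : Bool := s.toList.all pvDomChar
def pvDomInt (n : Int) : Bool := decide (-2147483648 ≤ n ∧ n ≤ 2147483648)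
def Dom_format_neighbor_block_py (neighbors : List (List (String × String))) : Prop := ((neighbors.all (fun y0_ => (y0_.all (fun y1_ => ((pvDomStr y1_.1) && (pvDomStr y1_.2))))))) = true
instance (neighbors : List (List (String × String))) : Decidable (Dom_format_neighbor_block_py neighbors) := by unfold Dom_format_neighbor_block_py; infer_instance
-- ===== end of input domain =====

-- B replaces A's fused loop (append + running budget + break) by two passes: format all lines, then scan for the cut index; same cost, different decomposition.


-- Python truthiness chain `o or b` for an Optional[str] `o`: None and "" are falsy.
def pvOrStr (o : Option String) (b : String) : String :=
  match o with
  | some s => if s = "" then b else s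
  | none => b

-- text = " ".join(((n.get("raw_content") or n.get("summary") or "").strip()).split()),
-- truncated to 379 chars + '…' when longer than 380 — identical in both Pythons.
def pvText (n : List (String × String)) : String :=
  let t := PySem.Str.strip
    (pvOrStr ((PySem.Dict.ofList n).get? "raw_content")
      (pvOrStr ((PySem.Dict.ofList n).get? "summary") ""))
  let t := PySem.Str.join " " (PySem.Str.split₀ t)
  if PySem.Str.len t > 380 then PySem.Str.slice t none (some 379) ++ "…" else t

-- f"[{i}] {text}" — identical in both Pythons.
def pvLine (i : Int) (n : List (String × String)) : String :=
  "[" ++ PySem.Int.toStr i ++ "] " ++ pvText n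

-- ===== PORT A =====
-- A's fused loop: for (i, n) in enumerate(neighbors, 1): build line, check budget, break or append.
def pvAloop : List (Int × List (String × String)) → List String → Int → List String
  | [], lines, _ => lines
  | (i, n) :: rest, lines, used =>
    let line := pvLine i n
    let need : Int := PySem.Str.len line + (if lines.isEmpty then 0 else 1)
    if used + need > 900 then lines
    else pvAloop rest (lines ++ [line]) (used + need)

def format_neighbor_block_py (neighbors : List (List (String × String))) : Option String :=
  if neighbors.isEmpty then none
  else
    let lines := pvAloop (PySem.List.enumerate neighbors 1) [] 0
    if lines.isEmpty then none else some (PySem.Str.join "\n" lines)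

-- ===== PORT B =====
-- B's second pass: while k < len(lines): total += len(lines[k]) + (1 if k else 0); break if over; k += 1.
def pvBscan (lines : List String) (k : Nat) (total : Int) : Nat :=
  if h : k < lines.length then
    let total := total + PySem.Str.len lines[k] + (if k = 0 then 0 else 1)
    if total > 900 then k else pvBscan lines (k + 1) total
  else k
termination_by lines.length - k

def format_neighbor_block_py_alt (neighbors : List (List (String × String))) : Option String :=
  let lines := (PySem.List.enumerate neighbors 1).map (fun p => pvLine p.1 p.2)
  let k := pvBscan lines 0 0
  if k = 0 then none else some (PySem.Str.join "\n" (lines.take k))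

-- ===== PRECONDITION & SPEC =====
def Spec_format_neighbor_block_py (neighbors : List (List (String × String))) (out : Option String) : Prop := out = format_neighbor_block_py_alt neighbors
instance (neighbors : List (List (String × String))) (out : Option String) : Decidable (Spec_format_neighbor_block_py neighbors out) := by unfold Spec_format_neighbor_block_py; infer_instance

-- ===== CLAIM (what is proved, stated in full; the proofs are below) =====
def Claim_equal_format_neighbor_block_py : Prop := ∀ (neighbors : List (List (String × String))), Dom_format_neighbor_block_py neighbors → Spec_format_neighbor_block_py neighbors (format_neighbor_block_py neighbors)

-- ===== LEMMAS AND PROOFS =====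

-- Common characterisation: the greedy prefix of lines kept by the 900-char budget.
def pvGreedy : List String → Int → Bool → List String
  | [], _, _ => []
  | l :: ls, used, ne =>
    let need : Int := PySem.Str.len l + (if ne then 1 else 0)
    if used + need > 900 then []
    else l :: pvGreedy ls (used + need) true

theorem pvAloop_eq_greedy (es : List (Int × List (String × String)))
    (acc : List String) (used : Int) :
    pvAloop es acc used =
      acc ++ pvGreedy (es.map (fun p => pvLine p.1 p.2)) used (!acc.isEmpty) := by
  induction es generalizing acc used with
  | nil => simp [pvAloop, pvGreedy]
  | cons p rest ih =>
    obtain ⟨i, n⟩ := p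
    simp only [pvAloop, pvGreedy, List.map_cons]
    have hneed : (if acc.isEmpty then (0 : Int) else 1) = (if (!acc.isEmpty) = true then 1 else 0) := by
      cases acc <;> simp
    have hfalse : ∀ x : String, (acc ++ [x]).isEmpty = false := by
      intro x; cases acc <;> rfl
    rw [hneed]
    split <;> split <;> simp [ih, hfalse]

theorem pvBscan_take (lines : List String) (k : Nat) (total : Int) :
    lines.take (pvBscan lines k total) =
      lines.take k ++ pvGreedy (lines.drop k) total (k != 0) := by
  fun_induction pvBscan lines k total with
  | case1 k total h t htot =>
    rw [List.drop_eq_getElem_cons h]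
    simp only [pvGreedy]
    have harg : total + (PySem.Str.len lines[k] + (if (k != 0) = true then (1:Int) else 0))
        = total + PySem.Str.len lines[k] + (if k = 0 then (0:Int) else 1) := by
      rcases Nat.eq_zero_or_pos k with hk | hk
      · subst hk; simp
      · have hk0 : ¬ k = 0 := Nat.pos_iff_ne_zero.mp hk
        simp [hk0, add_assoc]
    rw [if_pos (by rw [harg]; exact htot)]
    simp
  | case2 k total h t htot ih =>
    rw [ih, List.drop_eq_getElem_cons h]
    simp only [pvGreedy]
    have harg : total + (PySem.Str.len lines[k] + (if (k != 0) = true then (1:Int) else 0))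
        = total + PySem.Str.len lines[k] + (if k = 0 then (0:Int) else 1) := by
      rcases Nat.eq_zero_or_pos k with hk | hk
      · subst hk; simp
      · have hk0 : ¬ k = 0 := Nat.pos_iff_ne_zero.mp hk
        simp [hk0, add_assoc]
    rw [if_neg (by rw [harg]; exact htot)]
    have htake : lines.take (k + 1) = lines.take k ++ [lines[k]] := by
      rw [List.take_add_one]
      simp [List.getElem?_eq_getElem h]
    have ht : pvGreedy (List.drop (k + 1) lines) t (k + 1 != 0)
        = pvGreedy (List.drop (k + 1) lines) (total + (PySem.Str.len lines[k] + if (k != 0) = true then (1:Int) else 0)) true := by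
      rw [harg]; simp [t]
    rw [ht, htake]
    simp only [List.append_assoc, List.singleton_append]
  | case3 k total h =>
    have hd : lines.drop k = [] := List.drop_eq_nil_of_le (by omega)
    simp [hd, pvGreedy]

theorem pvBscan_nil : pvBscan ([] : List String) 0 0 = 0 := by
  rw [pvBscan]; simp

theorem pvGreedy_nil_iff_bscan_zero (L : List String) :
    (pvBscan L 0 0 = 0) ↔ L.take (pvBscan L 0 0) = [] := by
  constructor
  · intro h; simp [h]
  · intro h
    rcases List.take_eq_nil_iff.mp h with h0 | h0
    · exact h0
    · subst h0; exact pvBscan_nil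

-- ===== VERDICT (by name: the statement is the Claim_ definition above) =====
theorem format_neighbor_block_py_spec : Claim_equal_format_neighbor_block_py := by
  intro neighbors _
  unfold Spec_format_neighbor_block_py format_neighbor_block_py format_neighbor_block_py_alt
  set L := (PySem.List.enumerate neighbors 1).map (fun p => pvLine p.1 p.2) with hL
  have hA : pvAloop (PySem.List.enumerate neighbors 1) [] 0 = pvGreedy L 0 false := by
    simpa using pvAloop_eq_greedy (PySem.List.enumerate neighbors 1) [] 0
  have hB : L.take (pvBscan L 0 0) = pvGreedy L 0 false := by
    simpa using pvBscan_take L 0 0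
  have hiff := pvGreedy_nil_iff_bscan_zero L
  rcases neighbors with _ | ⟨n0, ns⟩
  · have hL0 : L = [] := by simp [hL, PySem.List.enumerate_nil]
    simp [hL0, pvBscan_nil]
  · simp only [List.isEmpty_cons, Bool.false_eq_true, if_false]
    rw [hA, ← hB]
    by_cases hk : pvBscan L 0 0 = 0
    · simp [hk]
    · have h1 : L.take (pvBscan L 0 0) ≠ [] := fun hc => hk (hiff.mpr hc)
      simp [hk, List.isEmpty_iff, h1]
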